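-- pv_equiv track=rewrite | github.com/matthewod11-stack/AskHR | scripts/ingest_pdf.py | map_chunks_to_pages
-- ===== SOURCE A (Python) =====
-- def map_chunks_to_pages(texts, chunk_bodies):
--     # Map chunk boundaries to page spans by accumulating char count per page
--     page_spans = []
--     char_accum = 0
--     page_boundaries = []
--     page_starts = []
--     curr_page = 1
--     # Build a list of (start_char, end_char, page_num)
--     for i, t in enumerate(texts):
--         page_starts.append(char_accum)
--         char_accum += len(t)
--     page_starts.append(char_accum)
--     # For each chunk, estimate start/end page
--     chunk_spans = []
--     curr_idx = 0
--     for chunk in chunk_bodies: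
--         chunk_start = curr_idx
--         chunk_end = curr_idx + len(chunk)
--         # Find page indices
--         start_page = end_page = 1
--         for i in range(len(page_starts)-1):
--             if chunk_start >= page_starts[i] and chunk_start < page_starts[i+1]:
--                 start_page = i+1
--             if chunk_end > page_starts[i] and chunk_end <= page_starts[i+1]:
--                 end_page = i+1
--         chunk_spans.append((start_page, end_page))
--         curr_idx += len(chunk)
--     return chunk_spans
-- ===== SOURCE B (Python) =====
-- def map_chunks_to_pages(texts, chunk_bodies):
--     # Cumulative character offsets of page boundaries and chunk boundaries.
--     page_starts = [0]
--     for t in texts: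
--         page_starts.append(page_starts[-1] + len(t))
--     offsets = [0]
--     for c in chunk_bodies:
--         offsets.append(offsets[-1] + len(c))
--     chunk_starts = offsets[:-1]
--     chunk_ends = offsets[1:]
--     m = len(chunk_bodies)
--     start_pages = [1] * m  # pages are 1-indexed; chunks lying outside the text keep page 1
--     end_pages = [1] * m
--     js = je = 0
--     # Both boundary lists are nondecreasing, so one monotone sweep over the pages
--     # assigns every chunk boundary its page: each pointer only moves forward.
--     for i in range(len(page_starts) - 1):
--         while js < m and chunk_starts[js] < page_starts[i + 1]:
--             start_pages[js] = i + 1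
--             js += 1
--         while je < m and chunk_ends[je] <= page_starts[i + 1]:
--             if chunk_ends[je] > page_starts[i]:
--                 end_pages[je] = i + 1
--             je += 1
--     return list(zip(start_pages, end_pages))
-- ===== Notes on version B (the rewrite author's own statement) =====
-- stated objective: faster
-- what changed: B replaces A's per-chunk linear scan over all pages by a single monotone two-pointer sweep: pages are walked once while two forward-only pointers over the sorted chunk start/end offsets assign each chunk its page span.
import Mathlib
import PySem

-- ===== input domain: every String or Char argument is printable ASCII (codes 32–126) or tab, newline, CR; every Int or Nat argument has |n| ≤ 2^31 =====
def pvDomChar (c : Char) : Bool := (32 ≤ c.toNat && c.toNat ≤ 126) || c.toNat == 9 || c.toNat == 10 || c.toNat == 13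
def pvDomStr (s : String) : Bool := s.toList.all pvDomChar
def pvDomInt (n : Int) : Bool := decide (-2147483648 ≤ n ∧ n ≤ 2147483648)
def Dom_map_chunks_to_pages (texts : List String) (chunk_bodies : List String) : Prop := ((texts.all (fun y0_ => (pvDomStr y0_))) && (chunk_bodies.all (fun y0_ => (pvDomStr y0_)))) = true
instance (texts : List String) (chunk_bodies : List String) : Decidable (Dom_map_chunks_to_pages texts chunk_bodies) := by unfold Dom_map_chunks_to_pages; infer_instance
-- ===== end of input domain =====

-- B replaces A's per-chunk linear scan over all pages by one monotone two-pointer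
-- sweep over the pages; a timing run measures the speed difference.

-- ===== PORT A =====
def map_chunks_to_pages (texts : List String) (chunk_bodies : List String) : List (List Int) :=
  -- for i, t in enumerate(texts): page_starts.append(char_accum); char_accum += len(t)
  let st := texts.foldl (fun (st : List Int × Int) t =>
      (st.1 ++ [st.2], st.2 + PySem.Str.len t)) (([] : List Int), (0 : Int))
  let page_starts := st.1 ++ [st.2]
  let res := chunk_bodies.foldl (fun (st : List (List Int) × Int) chunk =>
      let chunk_start := st.2
      let chunk_end := st.2 + PySem.Str.len chunk
      -- for i in range(len(page_starts)-1): two independent last-match updates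
      let se := (PySem.List.pyRange 0 ((page_starts.length : Int) - 1) 1).foldl
          (fun (se : Int × Int) i =>
            (if chunk_start ≥ PySem.List.pyGetD page_starts i 0 ∧
                chunk_start < PySem.List.pyGetD page_starts (i+1) 0 then i+1 else se.1,
             if chunk_end > PySem.List.pyGetD page_starts i 0 ∧
                chunk_end ≤ PySem.List.pyGetD page_starts (i+1) 0 then i+1 else se.2))
          ((1 : Int), (1 : Int))
      (st.1 ++ [[se.1, se.2]], chunk_end)) (([] : List (List Int)), (0 : Int))
  res.1

-- ===== PORT B =====
-- Source B's first while loop: consume chunk starts below `bound`, stamping page `v`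
def pvSweepStart (xs : List Int) (m : Nat) (bound v : Int) (arr : List Int) (j : Nat) : List Int × Nat :=
  if h : j < m ∧ xs.getD j 0 < bound then
    pvSweepStart xs m bound v (arr.set j v) (j+1)
  else (arr, j)
termination_by m - j
decreasing_by omega

-- Source B's second while loop: consume chunk ends ≤ `hi`, stamping `v` on those > `lo`
def pvSweepEnd (xs : List Int) (m : Nat) (lo hi v : Int) (arr : List Int) (j : Nat) : List Int × Nat :=
  if h : j < m ∧ xs.getD j 0 ≤ hi then
    pvSweepEnd xs m lo hi v (if lo < xs.getD j 0 then arr.set j v else arr) (j+1)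
  else (arr, j)
termination_by m - j
decreasing_by omega

def map_chunks_to_pages_alt (texts : List String) (chunk_bodies : List String) : List (List Int) :=
  -- page_starts = [0]; for t in texts: page_starts.append(page_starts[-1] + len(t))
  let stp := texts.foldl (fun (st : List Int × Int) t =>
      let nxt := st.2 + PySem.Str.len t
      (st.1 ++ [nxt], nxt)) (([0] : List Int), (0 : Int))
  let page_starts := stp.1
  -- offsets = [0]; for c in chunk_bodies: offsets.append(offsets[-1] + len(c))
  let sto := chunk_bodies.foldl (fun (st : List Int × Int) c =>
      let nxt := st.2 + PySem.Str.len c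
      (st.1 ++ [nxt], nxt)) (([0] : List Int), (0 : Int))
  let offsets := sto.1
  let chunk_starts := PySem.List.slice offsets none (some (-1))   -- offsets[:-1]
  let chunk_ends := PySem.List.slice offsets (some 1) none        -- offsets[1:]
  let m := chunk_bodies.length
  -- for i in range(len(page_starts) - 1): two while loops, each a forward-only pointer
  let fin := (PySem.List.pyRange 0 ((page_starts.length : Int) - 1) 1).foldl
      (fun (st : (List Int × Nat) × (List Int × Nat)) i =>
        (pvSweepStart chunk_starts m (PySem.List.pyGetD page_starts (i+1) 0) (i+1) st.1.1 st.1.2,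
         pvSweepEnd chunk_ends m (PySem.List.pyGetD page_starts i 0) (PySem.List.pyGetD page_starts (i+1) 0) (i+1) st.2.1 st.2.2))
      ((List.replicate m 1, 0), (List.replicate m 1, 0))
  List.zipWith (fun a b => [a, b]) fin.1.1 fin.2.1

-- ===== PRECONDITION & SPEC =====
def Spec_map_chunks_to_pages (texts : List String) (chunk_bodies : List String) (out : List (List Int)) : Prop := out = map_chunks_to_pages_alt texts chunk_bodies
instance (texts : List String) (chunk_bodies : List String) (out : List (List Int)) : Decidable (Spec_map_chunks_to_pages texts chunk_bodies out) := by unfold Spec_map_chunks_to_pages; infer_instance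

-- ===== CLAIM (what is proved, stated in full; the proofs are below) =====
def Claim_equal_map_chunks_to_pages : Prop := ∀ (texts : List String) (chunk_bodies : List String), Dom_map_chunks_to_pages texts chunk_bodies → Spec_map_chunks_to_pages texts chunk_bodies (map_chunks_to_pages texts chunk_bodies)

-- ===== LEMMAS AND PROOFS =====

-- the page of a chunk-start / chunk-end offset, described through bisection into ps;
-- both programs are proved equal to the span list `spansOf` built from these
def fSf (ps : List Int) (s : Int) : Int :=
  if PySem.List.bisectRight ps s < ps.length then ((PySem.List.bisectRight ps s : Nat) : Int) else 1

def fEf (ps : List Int) (e : Int) : Int :=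
  if 1 ≤ PySem.List.bisectLeft ps e ∧ PySem.List.bisectLeft ps e < ps.length
  then ((PySem.List.bisectLeft ps e : Nat) : Int) else 1

def spansOf (ps : List Int) : Int → List Int → List (List Int)
  | _, [] => []
  | pos, K :: Ks => [fSf ps pos, fEf ps (pos + K)] :: spansOf ps (pos + K) Ks

-- cumulative sums: cumsA c Ls = starts before each block, cumsT c Ls = totals after, cend = final total
def cumsA : Int → List Int → List Int
  | _, [] => []
  | c, L :: Ls => c :: cumsA (c + L) Ls

def cumsT : Int → List Int → List Int
  | _, [] => []
  | c, L :: Ls => (c + L) :: cumsT (c + L) Ls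

def cend : Int → List Int → Int
  | c, [] => c
  | c, L :: Ls => cend (c + L) Ls

theorem foldA_ps (ts : List String) (acc : List Int) (c : Int) :
    ts.foldl (fun (st : List Int × Int) t => (st.1 ++ [st.2], st.2 + PySem.Str.len t)) (acc, c)
      = (acc ++ cumsA c (ts.map PySem.Str.len), cend c (ts.map PySem.Str.len)) := by
  induction ts generalizing acc c with
  | nil => simp [cumsA, cend]
  | cons t ts ih =>
    simp only [List.foldl_cons]
    rw [ih]
    simp [cumsA, cend]

theorem foldB_ps (ts : List String) (acc : List Int) (c : Int) :
    ts.foldl (fun (st : List Int × Int) t =>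
        let nxt := st.2 + PySem.Str.len t
        (st.1 ++ [nxt], nxt)) (acc, c)
      = (acc ++ cumsT c (ts.map PySem.Str.len), cend c (ts.map PySem.Str.len)) := by
  induction ts generalizing acc c with
  | nil => simp [cumsT, cend]
  | cons t ts ih =>
    simp only [List.foldl_cons]
    rw [ih]
    simp [cumsT, cend]

theorem cumsA_append_cend (Ls : List Int) (c : Int) :
    cumsA c Ls ++ [cend c Ls] = c :: cumsT c Ls := by
  induction Ls generalizing c with
  | nil => simp [cumsA, cumsT, cend]
  | cons L Ls ih => simp [cumsA, cumsT, cend, ih]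

theorem cumsT_length (Ls : List Int) (c : Int) : (cumsT c Ls).length = Ls.length := by
  induction Ls generalizing c with
  | nil => simp [cumsT]
  | cons L Ls ih => simp [cumsT, ih]

theorem le_cumsT (Ls : List Int) (c x : Int) (hx : x ≤ c) (h : ∀ L ∈ Ls, 0 ≤ L) :
    ∀ y ∈ cumsT c Ls, x ≤ y := by
  induction Ls generalizing c x with
  | nil => simp [cumsT]
  | cons L Ls ih =>
    have h0 : (0:Int) ≤ L := h L (by simp)
    intro y hy
    simp only [cumsT, List.mem_cons] at hy
    rcases hy with rfl | hy
    · omega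
    · exact ih (c + L) x (by omega) (fun L' hL' => h L' (by simp [hL'])) y hy

theorem pairwise_cumsT (Ls : List Int) (c : Int) (h : ∀ L ∈ Ls, 0 ≤ L) :
    List.Pairwise (· ≤ ·) (c :: cumsT c Ls) := by
  induction Ls generalizing c with
  | nil => simp [cumsT]
  | cons L Ls ih =>
    have h0 : (0:Int) ≤ L := h L (by simp)
    have htl : ∀ L' ∈ Ls, (0:Int) ≤ L' := fun L' hL' => h L' (by simp [hL'])
    simp only [cumsT]
    exact List.Pairwise.cons
      (fun y hy => by
        rcases (List.mem_cons.mp hy) with rfl | hy'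
        · omega
        · exact le_cumsT Ls (c + L) c (by omega) htl y hy')
      (ih (c + L) htl)

theorem mono_getD_of_pairwise (l : List Int) (h : List.Pairwise (· ≤ ·) l) :
    ∀ t u, t ≤ u → u < l.length → l.getD t 0 ≤ l.getD u 0 := by
  intro t u htu hu
  rw [List.getD_eq_getElem l 0 (by omega), List.getD_eq_getElem l 0 hu]
  rcases Nat.eq_or_lt_of_le htu with rfl | hlt
  · exact le_refl _
  · exact (List.pairwise_iff_getElem.mp h) t u (by omega) hu hlt

-- characterizations of fSf / fEf on a sorted ps
theorem fSf_char (ps : List Int) (hpw : List.Pairwise (· ≤ ·) ps) (i : Nat)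
    (hi : i + 1 < ps.length) (s : Int)
    (h1 : ps.getD i 0 ≤ s) (h2 : s < ps.getD (i+1) 0) : fSf ps s = ((i+1 : Nat) : Int) := by
  obtain ⟨hrN, hrle, hrgt⟩ := PySem.List.bisectRight_spec ps s hpw
  rw [List.getD_eq_getElem ps 0 (by omega)] at h1
  rw [List.getD_eq_getElem ps 0 hi] at h2
  have hr : PySem.List.bisectRight ps s = i + 1 := by
    by_contra hne
    rcases Nat.lt_or_ge (PySem.List.bisectRight ps s) (i+1) with hlt | hge
    · exact absurd (hrgt i (by omega) (by omega)) (not_lt.mpr h1)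
    · exact absurd (hrle (i+1) hi (by omega)) (not_le.mpr h2)
  unfold fSf
  rw [hr, if_pos (by omega)]

theorem fEf_char (ps : List Int) (hpw : List.Pairwise (· ≤ ·) ps) (i : Nat)
    (hi : i + 1 < ps.length) (e : Int)
    (h1 : ps.getD i 0 < e) (h2 : e ≤ ps.getD (i+1) 0) : fEf ps e = ((i+1 : Nat) : Int) := by
  obtain ⟨hkN, hklt, hkge⟩ := PySem.List.bisectLeft_spec ps e hpw
  rw [List.getD_eq_getElem ps 0 (by omega)] at h1
  rw [List.getD_eq_getElem ps 0 hi] at h2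
  have hk : PySem.List.bisectLeft ps e = i + 1 := by
    by_contra hne
    rcases Nat.lt_or_ge (PySem.List.bisectLeft ps e) (i+1) with hlt | hge
    · exact absurd (hkge i (by omega) (by omega)) (not_le.mpr h1)
    · exact absurd (hklt (i+1) hi (by omega)) (not_lt.mpr h2)
  unfold fEf
  rw [hk, if_pos (by omega)]

theorem fSf_top (ps : List Int) (hpw : List.Pairwise (· ≤ ·) ps) (hN : 1 ≤ ps.length)
    (s : Int) (h : ps.getD (ps.length - 1) 0 ≤ s) : fSf ps s = 1 := by
  obtain ⟨hrN, hrle, hrgt⟩ := PySem.List.bisectRight_spec ps s hpw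
  rw [List.getD_eq_getElem ps 0 (by omega)] at h
  unfold fSf
  rw [if_neg]
  intro hlt
  exact absurd (hrgt (ps.length - 1) (by omega) (by omega)) (not_lt.mpr h)

theorem fEf_top (ps : List Int) (hpw : List.Pairwise (· ≤ ·) ps) (hN : 1 ≤ ps.length)
    (e : Int) (h : ps.getD (ps.length - 1) 0 < e) : fEf ps e = 1 := by
  obtain ⟨hkN, hklt, hkge⟩ := PySem.List.bisectLeft_spec ps e hpw
  rw [List.getD_eq_getElem ps 0 (by omega)] at h
  unfold fEf
  rw [if_neg]
  rintro ⟨-, hlt⟩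
  exact absurd (hkge (ps.length - 1) (by omega) (by omega)) (not_le.mpr h)

theorem fEf_zero (ps : List Int) (hpw : List.Pairwise (· ≤ ·) ps) (hN : 1 ≤ ps.length)
    (h0 : ps.getD 0 0 = 0) (e : Int) (he : e ≤ 0) : fEf ps e = 1 := by
  obtain ⟨hkN, hklt, hkge⟩ := PySem.List.bisectLeft_spec ps e hpw
  rw [List.getD_eq_getElem ps 0 (by omega)] at h0
  unfold fEf
  rw [if_neg]
  rintro ⟨h1, -⟩
  have := hklt 0 (by omega) (by omega)
  omega

-- ---- A's inner scan computes fSf / fEf ----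

-- last-write fold over a list that never matches
theorem foldl_if_none {P : Int → Prop} [DecidablePred P] (l : List Int) (f : Int → Int) (init : Int)
    (h : ∀ i ∈ l, ¬ P i) :
    l.foldl (fun s i => if P i then f i else s) init = init := by
  induction l generalizing init with
  | nil => rfl
  | cons a l ih =>
    simp only [List.foldl_cons, if_neg (h a (by simp))]
    exact ih init (fun i hi => h i (by simp [hi]))

theorem start_scan_eq (ps : List Int) (hN : 1 ≤ ps.length)
    (h0 : ps.getD 0 0 = 0) (hpw : List.Pairwise (· ≤ ·) ps)
    (cs : Int) (hcs : 0 ≤ cs) :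
    (PySem.List.pyRange 0 ((ps.length : Int) - 1) 1).foldl
        (fun (s : Int) i => if cs ≥ PySem.List.pyGetD ps i 0 ∧ cs < PySem.List.pyGetD ps (i+1) 0 then i+1 else s) 1
      = fSf ps cs := by
  obtain ⟨hjN, hjle, hjgt⟩ := PySem.List.bisectRight_spec ps cs hpw
  set j := PySem.List.bisectRight ps cs with hjdef
  have hj1 : 1 ≤ j := by
    by_contra hc
    have hgt := hjgt 0 (by omega) (by omega)
    rw [← List.getD_eq_getElem ps 0 (by omega), h0] at hgt
    omega
  unfold fSf
  rw [← hjdef]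
  by_cases hjlt : j < ps.length
  · rw [if_pos hjlt]
    rw [PySem.List.pyRange_one_append 0 ((j:Int)-1) ((ps.length:Int)-1) (by omega) (by omega),
      PySem.List.pyRange_one_cons (show ((j:Int)-1) < (ps.length:Int)-1 by omega)]
    simp only [List.foldl_append, List.foldl_cons]
    have e1 : PySem.List.pyGetD ps ((j:Int)-1) 0 = ps[j-1]'(by omega) := by
      rw [PySem.List.pyGetD_eq_getElem ps (i := (j:Int)-1) 0 (by omega) (by omega)]
      simp only [show ((j:Int)-1).toNat = j - 1 from by omega]
    have e2 : PySem.List.pyGetD ps (((j:Int)-1)+1) 0 = ps[j]'hjlt := by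
      rw [show ((j:Int)-1)+1 = (j:Int) by ring,
        PySem.List.pyGetD_eq_getElem ps (i := (j:Int)) 0 (by omega) (by omega)]
      simp only [show ((j:Int)).toNat = j from by omega]
    have hcond : cs ≥ PySem.List.pyGetD ps ((j:Int)-1) 0 ∧ cs < PySem.List.pyGetD ps (((j:Int)-1)+1) 0 := by
      constructor
      · rw [e1]; exact hjle (j-1) (by omega) (by omega)
      · rw [e2]; exact hjgt j hjlt (le_refl j)
    rw [if_pos hcond, show ((j:Int)-1)+1 = (j:Int) by ring]
    refine foldl_if_none (P := fun i => cs ≥ PySem.List.pyGetD ps i 0 ∧ cs < PySem.List.pyGetD ps (i+1) 0) _ _ _ ?_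
    intro i hi hP
    rw [PySem.List.mem_pyRange_one] at hi
    obtain ⟨hge, _⟩ := hP
    rw [PySem.List.pyGetD_eq_getElem ps (i := i) 0 (by omega) (by omega)] at hge
    have hval := hjgt i.toNat (by omega) (by omega)
    exact absurd hval (not_lt.mpr hge)
  · rw [if_neg hjlt]
    refine foldl_if_none (P := fun i => cs ≥ PySem.List.pyGetD ps i 0 ∧ cs < PySem.List.pyGetD ps (i+1) 0) _ _ _ ?_
    intro i hi hP
    rw [PySem.List.mem_pyRange_one] at hi
    obtain ⟨_, hlt⟩ := hP
    rw [PySem.List.pyGetD_eq_getElem ps (i := i+1) 0 (by omega) (by omega)] at hlt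
    have hval := hjle (i+1).toNat (by omega) (by omega)
    exact absurd hlt (not_lt.mpr hval)

theorem end_scan_eq (ps : List Int)
    (hpw : List.Pairwise (· ≤ ·) ps) (ce : Int) :
    (PySem.List.pyRange 0 ((ps.length : Int) - 1) 1).foldl
        (fun (s : Int) i => if ce > PySem.List.pyGetD ps i 0 ∧ ce ≤ PySem.List.pyGetD ps (i+1) 0 then i+1 else s) 1
      = fEf ps ce := by
  obtain ⟨hkN, hkle, hkgt⟩ := PySem.List.bisectLeft_spec ps ce hpw
  set k := PySem.List.bisectLeft ps ce with hkdef
  unfold fEf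
  rw [← hkdef]
  by_cases hk : 1 ≤ k ∧ k < ps.length
  · rw [if_pos hk]
    obtain ⟨hk1, hklt⟩ := hk
    rw [PySem.List.pyRange_one_append 0 ((k:Int)-1) ((ps.length:Int)-1) (by omega) (by omega),
      PySem.List.pyRange_one_cons (show ((k:Int)-1) < (ps.length:Int)-1 by omega)]
    simp only [List.foldl_append, List.foldl_cons]
    have e1 : PySem.List.pyGetD ps ((k:Int)-1) 0 = ps[k-1]'(by omega) := by
      rw [PySem.List.pyGetD_eq_getElem ps (i := (k:Int)-1) 0 (by omega) (by omega)]
      simp only [show ((k:Int)-1).toNat = k - 1 from by omega]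
    have e2 : PySem.List.pyGetD ps (((k:Int)-1)+1) 0 = ps[k]'hklt := by
      rw [show ((k:Int)-1)+1 = (k:Int) by ring,
        PySem.List.pyGetD_eq_getElem ps (i := (k:Int)) 0 (by omega) (by omega)]
      simp only [show ((k:Int)).toNat = k from by omega]
    have hcond : ce > PySem.List.pyGetD ps ((k:Int)-1) 0 ∧ ce ≤ PySem.List.pyGetD ps (((k:Int)-1)+1) 0 := by
      constructor
      · rw [e1]; exact hkle (k-1) (by omega) (by omega)
      · rw [e2]; exact hkgt k hklt (le_refl k)
    rw [if_pos hcond, show ((k:Int)-1)+1 = (k:Int) by ring]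
    refine foldl_if_none (P := fun i => ce > PySem.List.pyGetD ps i 0 ∧ ce ≤ PySem.List.pyGetD ps (i+1) 0) _ _ _ ?_
    intro i hi hP
    rw [PySem.List.mem_pyRange_one] at hi
    obtain ⟨hgt, _⟩ := hP
    rw [PySem.List.pyGetD_eq_getElem ps (i := i) 0 (by omega) (by omega)] at hgt
    have hval := hkgt i.toNat (by omega) (by omega)
    exact absurd hgt (not_lt.mpr hval)
  · rw [if_neg hk]
    have hcases : k = 0 ∨ k = ps.length := by omega
    refine foldl_if_none (P := fun i => ce > PySem.List.pyGetD ps i 0 ∧ ce ≤ PySem.List.pyGetD ps (i+1) 0) _ _ _ ?_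
    intro i hi hP
    rw [PySem.List.mem_pyRange_one] at hi
    obtain ⟨hgt, hle⟩ := hP
    rcases hcases with hk0 | hkN'
    · rw [PySem.List.pyGetD_eq_getElem ps (i := i) 0 (by omega) (by omega)] at hgt
      have hval := hkgt i.toNat (by omega) (by omega)
      exact absurd hgt (not_lt.mpr hval)
    · rw [PySem.List.pyGetD_eq_getElem ps (i := i+1) 0 (by omega) (by omega)] at hle
      have hval := hkle (i+1).toNat (by omega) (by omega)
      exact absurd hval (not_lt.mpr hle)

-- A's chunk loop builds spansOf
theorem A_chunks_eq (ps : List Int) (hN : 1 ≤ ps.length) (h0 : ps.getD 0 0 = 0)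
    (hpw : List.Pairwise (· ≤ ·) ps) :
    ∀ (chunks : List String) (acc : List (List Int)) (pos : Int), 0 ≤ pos →
    (chunks.foldl (fun (st : List (List Int) × Int) chunk =>
        let chunk_start := st.2
        let chunk_end := st.2 + PySem.Str.len chunk
        let se := (PySem.List.pyRange 0 ((ps.length : Int) - 1) 1).foldl
            (fun (se : Int × Int) i =>
              (if chunk_start ≥ PySem.List.pyGetD ps i 0 ∧
                  chunk_start < PySem.List.pyGetD ps (i+1) 0 then i+1 else se.1,
               if chunk_end > PySem.List.pyGetD ps i 0 ∧
                  chunk_end ≤ PySem.List.pyGetD ps (i+1) 0 then i+1 else se.2))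
            ((1 : Int), (1 : Int))
        (st.1 ++ [[se.1, se.2]], chunk_end)) (acc, pos)).1
    = acc ++ spansOf ps pos (chunks.map PySem.Str.len) := by
  intro chunks
  induction chunks with
  | nil => intro acc pos hpos; simp [spansOf]
  | cons c cs ih =>
    intro acc pos hpos
    have hlen : (0:Int) ≤ PySem.Str.len c := by simp
    simp only [List.foldl_cons]
    rw [PySem.List.foldl_prod_mk
        (f := fun (s : Int) i => if pos ≥ PySem.List.pyGetD ps i 0 ∧
            pos < PySem.List.pyGetD ps (i+1) 0 then i+1 else s)
        (g := fun (s : Int) i => if pos + PySem.Str.len c > PySem.List.pyGetD ps i 0 ∧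
            pos + PySem.Str.len c ≤ PySem.List.pyGetD ps (i+1) 0 then i+1 else s)]
    rw [start_scan_eq ps hN h0 hpw pos hpos, end_scan_eq ps hpw (pos + PySem.Str.len c)]
    rw [ih _ _ (by omega)]
    simp [spansOf]

-- ---- B's sweeps ----

theorem pvSweepStart_spec (xs : List Int) (m : Nat)
    (hmono : ∀ t u, t ≤ u → u < m → xs.getD t 0 ≤ xs.getD u 0)
    (lo bound v : Int) (F : Int → Int)
    (hv : ∀ s, lo ≤ s → s < bound → F s = v) :
    ∀ (n j : Nat) (arr : List Int), m - j ≤ n → j ≤ m → arr.length = m →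
      (∀ t, t < j → arr.getD t 0 = F (xs.getD t 0)) →
      (∀ t, j ≤ t → t < m → arr.getD t 0 = 1 ∧ lo ≤ xs.getD t 0) →
      (pvSweepStart xs m bound v arr j).2 ≤ m ∧
      (pvSweepStart xs m bound v arr j).1.length = m ∧
      (∀ t, t < (pvSweepStart xs m bound v arr j).2 →
        (pvSweepStart xs m bound v arr j).1.getD t 0 = F (xs.getD t 0)) ∧
      (∀ t, (pvSweepStart xs m bound v arr j).2 ≤ t → t < m →
        (pvSweepStart xs m bound v arr j).1.getD t 0 = 1 ∧ bound ≤ xs.getD t 0) := by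
  intro n
  induction n with
  | zero =>
    intro j arr hn hj hlen hcons huncons
    have hjm : j = m := by omega
    rw [pvSweepStart, dif_neg (by omega)]
    exact ⟨by omega, hlen, fun t ht => hcons t ht, fun t ht1 ht2 => by omega⟩
  | succ n ih =>
    intro j arr hn hj hlen hcons huncons
    by_cases hg : j < m ∧ xs.getD j 0 < bound
    · rw [pvSweepStart, dif_pos hg]
      refine ih (j+1) (arr.set j v) (by omega) (by omega) (by simp [hlen]) ?_ ?_
      · intro t ht
        rcases Nat.lt_or_ge t j with htj | htj
        · rw [List.getD_eq_getElem _ 0 (by simp [hlen]; omega), List.getElem_set_ne (by omega),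
            ← List.getD_eq_getElem arr 0 (by omega)]
          exact hcons t htj
        · have htj' : t = j := by omega
          subst htj'
          rw [List.getD_eq_getElem _ 0 (by simp [hlen]; omega), List.getElem_set_self (by simp [hlen]; omega)]
          exact (hv _ (huncons t (le_refl _) hg.1).2 hg.2).symm
      · intro t ht1 ht2
        rw [List.getD_eq_getElem _ 0 (by simp [hlen]; omega), List.getElem_set_ne (by omega),
          ← List.getD_eq_getElem arr 0 (by omega)]
        exact huncons t (by omega) ht2
    · rw [pvSweepStart, dif_neg hg]
      refine ⟨hj, hlen, fun t ht => hcons t ht, fun t ht1 ht2 => ?_⟩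
      have hjm : j < m := by omega
      have hxb : ¬ xs.getD j 0 < bound := fun hc => hg ⟨hjm, hc⟩
      exact ⟨(huncons t ht1 ht2).1, le_trans (not_lt.mp hxb) (hmono j t ht1 ht2)⟩

theorem pvSweepEnd_spec (xs : List Int) (m : Nat)
    (hmono : ∀ t u, t ≤ u → u < m → xs.getD t 0 ≤ xs.getD u 0)
    (lo hi v : Int) (F : Int → Int) (Q : Int → Prop)
    (hv : ∀ e, lo < e → e ≤ hi → F e = v)
    (h1 : ∀ e, Q e → e ≤ lo → F e = 1) :
    ∀ (n j : Nat) (arr : List Int), m - j ≤ n → j ≤ m → arr.length = m →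
      (∀ t, t < j → arr.getD t 0 = F (xs.getD t 0)) →
      (∀ t, j ≤ t → t < m → arr.getD t 0 = 1 ∧ Q (xs.getD t 0)) →
      (pvSweepEnd xs m lo hi v arr j).2 ≤ m ∧
      (pvSweepEnd xs m lo hi v arr j).1.length = m ∧
      (∀ t, t < (pvSweepEnd xs m lo hi v arr j).2 →
        (pvSweepEnd xs m lo hi v arr j).1.getD t 0 = F (xs.getD t 0)) ∧
      (∀ t, (pvSweepEnd xs m lo hi v arr j).2 ≤ t → t < m →
        (pvSweepEnd xs m lo hi v arr j).1.getD t 0 = 1 ∧ hi < xs.getD t 0) := by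
  intro n
  induction n with
  | zero =>
    intro j arr hn hj hlen hcons huncons
    have hjm : j = m := by omega
    rw [pvSweepEnd, dif_neg (by omega)]
    exact ⟨by omega, hlen, fun t ht => hcons t ht, fun t ht1 ht2 => by omega⟩
  | succ n ih =>
    intro j arr hn hj hlen hcons huncons
    by_cases hg : j < m ∧ xs.getD j 0 ≤ hi
    · rw [pvSweepEnd, dif_pos hg]
      set arr' := if lo < xs.getD j 0 then arr.set j v else arr with harr'
      have hlen' : arr'.length = m := by
        rw [harr']; split_ifs <;> simp [hlen]
      refine ih (j+1) arr' (by omega) (by omega) hlen' ?_ ?_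
      · intro t ht
        rcases Nat.lt_or_ge t j with htj | htj
        · have : arr'.getD t 0 = arr.getD t 0 := by
            rw [harr']; split_ifs with hc
            · rw [List.getD_eq_getElem _ 0 (by simp [hlen]; omega), List.getElem_set_ne (by omega),
                ← List.getD_eq_getElem arr 0 (by omega)]
            · rfl
          rw [this]; exact hcons t htj
        · have htj' : t = j := by omega
          subst htj'
          rw [harr']
          split_ifs with hc
          · rw [List.getD_eq_getElem _ 0 (by simp [hlen]; omega), List.getElem_set_self (by simp [hlen]; omega)]
            exact (hv _ hc hg.2).symm
          · rw [(huncons t (le_refl _) hg.1).1]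
            exact (h1 _ (huncons t (le_refl _) hg.1).2 (not_lt.mp hc)).symm
      · intro t ht1 ht2
        have : arr'.getD t 0 = arr.getD t 0 := by
          rw [harr']; split_ifs with hc
          · rw [List.getD_eq_getElem _ 0 (by simp [hlen]; omega), List.getElem_set_ne (by omega),
              ← List.getD_eq_getElem arr 0 (by omega)]
          · rfl
        rw [this]
        exact huncons t (by omega) ht2
    · rw [pvSweepEnd, dif_neg hg]
      refine ⟨hj, hlen, fun t ht => hcons t ht, fun t ht1 ht2 => ?_⟩
      have hjm : j < m := by omega
      have hxb : ¬ xs.getD j 0 ≤ hi := fun hc => hg ⟨hjm, hc⟩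
      exact ⟨(huncons t ht1 ht2).1, lt_of_lt_of_le (not_le.mp hxb) (hmono j t ht1 ht2)⟩

theorem pyGetD_nat (ps : List Int) (i : Nat) (h : i < ps.length) :
    PySem.List.pyGetD ps ((i : Nat) : Int) 0 = ps.getD i 0 := by
  rw [PySem.List.pyGetD_eq_getElem ps 0 (by omega) (by exact_mod_cast h),
    List.getD_eq_getElem ps 0 h]
  simp

-- B's page loop maintains and finishes the sweep invariants
theorem pages_loop (ps startsL endsL : List Int) (m : Nat)
    (hppw : List.Pairwise (· ≤ ·) ps) (h0 : ps.getD 0 0 = 0) (hN : 1 ≤ ps.length)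
    (hsm : ∀ t u, t ≤ u → u < m → startsL.getD t 0 ≤ startsL.getD u 0)
    (hem : ∀ t u, t ≤ u → u < m → endsL.getD t 0 ≤ endsL.getD u 0) :
    ∀ (k i : Nat), i + k + 1 = ps.length →
    ∀ (sp ep : List Int) (js je : Nat),
    js ≤ m → sp.length = m →
    (∀ t, t < js → sp.getD t 0 = fSf ps (startsL.getD t 0)) →
    (∀ t, js ≤ t → t < m → sp.getD t 0 = 1 ∧ ps.getD i 0 ≤ startsL.getD t 0) →
    je ≤ m → ep.length = m →
    (∀ t, t < je → ep.getD t 0 = fEf ps (endsL.getD t 0)) →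
    (∀ t, je ≤ t → t < m → ep.getD t 0 = 1 ∧ (i = 0 ∨ ps.getD i 0 < endsL.getD t 0)) →
    ((PySem.List.pyRange ((i : Nat) : Int) ((ps.length : Int) - 1) 1).foldl
      (fun (st : (List Int × Nat) × (List Int × Nat)) q =>
        (pvSweepStart startsL m (PySem.List.pyGetD ps (q+1) 0) (q+1) st.1.1 st.1.2,
         pvSweepEnd endsL m (PySem.List.pyGetD ps q 0) (PySem.List.pyGetD ps (q+1) 0) (q+1) st.2.1 st.2.2))
      ((sp, js), (ep, je))).1.1.length = m ∧
    ((PySem.List.pyRange ((i : Nat) : Int) ((ps.length : Int) - 1) 1).foldl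
      (fun (st : (List Int × Nat) × (List Int × Nat)) q =>
        (pvSweepStart startsL m (PySem.List.pyGetD ps (q+1) 0) (q+1) st.1.1 st.1.2,
         pvSweepEnd endsL m (PySem.List.pyGetD ps q 0) (PySem.List.pyGetD ps (q+1) 0) (q+1) st.2.1 st.2.2))
      ((sp, js), (ep, je))).2.1.length = m ∧
    (∀ t, t < m →
      ((PySem.List.pyRange ((i : Nat) : Int) ((ps.length : Int) - 1) 1).foldl
        (fun (st : (List Int × Nat) × (List Int × Nat)) q =>
          (pvSweepStart startsL m (PySem.List.pyGetD ps (q+1) 0) (q+1) st.1.1 st.1.2,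
           pvSweepEnd endsL m (PySem.List.pyGetD ps q 0) (PySem.List.pyGetD ps (q+1) 0) (q+1) st.2.1 st.2.2))
        ((sp, js), (ep, je))).1.1.getD t 0 = fSf ps (startsL.getD t 0)) ∧
    (∀ t, t < m →
      ((PySem.List.pyRange ((i : Nat) : Int) ((ps.length : Int) - 1) 1).foldl
        (fun (st : (List Int × Nat) × (List Int × Nat)) q =>
          (pvSweepStart startsL m (PySem.List.pyGetD ps (q+1) 0) (q+1) st.1.1 st.1.2,
           pvSweepEnd endsL m (PySem.List.pyGetD ps q 0) (PySem.List.pyGetD ps (q+1) 0) (q+1) st.2.1 st.2.2))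
        ((sp, js), (ep, je))).2.1.getD t 0 = fEf ps (endsL.getD t 0)) := by
  intro k
  induction k with
  | zero =>
    intro i hik sp ep js je hjs hsp hconS hunS hje hep hconE hunE
    have hrange : PySem.List.pyRange ((i : Nat) : Int) ((ps.length : Int) - 1) 1 = [] :=
      PySem.List.pyRange_one_eq_nil (by omega)
    rw [hrange]
    simp only [List.foldl_nil]
    refine ⟨hsp, hep, fun t ht => ?_, fun t ht => ?_⟩
    · rcases Nat.lt_or_ge t js with hlt | hge
      · exact hconS t hlt
      · obtain ⟨h1', h2'⟩ := hunS t hge ht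
        rw [h1', fSf_top ps hppw hN _ (by rw [show ps.length - 1 = i from by omega]; exact h2')]
    · rcases Nat.lt_or_ge t je with hlt | hge
      · exact hconE t hlt
      · obtain ⟨h1', h2'⟩ := hunE t hge ht
        rcases h2' with hz | hlt'
        · subst hz
          -- only one page boundary: fEf is always 1
          rw [h1']
          have hlen1 : ps.length = 1 := by omega
          obtain ⟨hkN, hklt, hkge⟩ := PySem.List.bisectLeft_spec ps (endsL.getD t 0) hppw
          unfold fEf
          rw [if_neg (by omega)]
        · rw [h1', fEf_top ps hppw hN _ (by rw [show ps.length - 1 = i from by omega]; exact hlt')]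
  | succ k ih =>
    intro i hik sp ep js je hjs hsp hconS hunS hje hep hconE hunE
    have hi1 : i + 1 < ps.length := by omega
    rw [PySem.List.pyRange_one_cons (by omega : ((i : Nat) : Int) < (ps.length : Int) - 1)]
    simp only [List.foldl_cons]
    have hgi : PySem.List.pyGetD ps ((i : Nat) : Int) 0 = ps.getD i 0 := pyGetD_nat ps i (by omega)
    have hgi1 : PySem.List.pyGetD ps (((i : Nat) : Int) + 1) 0 = ps.getD (i+1) 0 := by
      rw [show ((i : Nat) : Int) + 1 = (((i+1 : Nat) : Nat) : Int) by push_cast; ring]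
      exact pyGetD_nat ps (i+1) hi1
    obtain ⟨hS1, hS2, hS3, hS4⟩ := pvSweepStart_spec startsL m hsm (ps.getD i 0) (ps.getD (i+1) 0)
      (((i : Nat) : Int) + 1) (fSf ps)
      (fun s hs1 hs2 => by rw [fSf_char ps hppw i hi1 s hs1 hs2]; push_cast; ring)
      (m - js) js sp (le_refl _) hjs hsp hconS hunS
    obtain ⟨hE1, hE2, hE3, hE4⟩ := pvSweepEnd_spec endsL m hem (ps.getD i 0) (ps.getD (i+1) 0)
      (((i : Nat) : Int) + 1) (fEf ps) (fun e => i = 0 ∨ ps.getD i 0 < e)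
      (fun e he1 he2 => by rw [fEf_char ps hppw i hi1 e he1 he2]; push_cast; ring)
      (fun e hQ hle => by
        rcases hQ with hz | hgt
        · exact fEf_zero ps hppw hN h0 e (by rw [hz] at hle; omega)
        · omega)
      (m - je) je ep (le_refl _) hje hep hconE hunE
    rw [hgi, hgi1]
    have hcast : ((i : Nat) : Int) + 1 = (((i+1 : Nat) : Nat) : Int) := by push_cast; ring
    rw [hcast]
    exact ih (i+1) (by omega)
      (pvSweepStart startsL m (ps.getD (i+1) 0) (((i : Nat) : Int) + 1) sp js).1
      (pvSweepEnd endsL m (ps.getD i 0) (ps.getD (i+1) 0) (((i : Nat) : Int) + 1) ep je).1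
      (pvSweepStart startsL m (ps.getD (i+1) 0) (((i : Nat) : Int) + 1) sp js).2
      (pvSweepEnd endsL m (ps.getD i 0) (ps.getD (i+1) 0) (((i : Nat) : Int) + 1) ep je).2
      hS1 hS2 hS3 (fun t ht1 ht2 => hS4 t ht1 ht2)
      hE1 hE2 hE3 (fun t ht1 ht2 => ⟨(hE4 t ht1 ht2).1, Or.inr (hE4 t ht1 ht2).2⟩)

-- spansOf elementwise
theorem spansOf_length (ps : List Int) (Ks : List Int) :
    ∀ pos, (spansOf ps pos Ks).length = Ks.length := by
  induction Ks with
  | nil => intro pos; simp [spansOf]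
  | cons K Ks ih => intro pos; simp [spansOf, ih]

theorem spansOf_getD (ps : List Int) (Ks : List Int) :
    ∀ (pos : Int) (t : Nat), t < Ks.length →
      (spansOf ps pos Ks).getD t [] =
        [fSf ps ((cumsA pos Ks).getD t 0), fEf ps ((cumsT pos Ks).getD t 0)] := by
  induction Ks with
  | nil => intro pos t ht; simp at ht
  | cons K Ks ih =>
    intro pos t ht
    cases t with
    | zero => simp [spansOf, cumsA, cumsT]
    | succ t =>
      simp only [spansOf, cumsA, cumsT, List.getD_cons_succ]
      exact ih (pos + K) t (by simpa using ht)

-- everything in 0 :: cumsT 0 Ls is nonnegative (lengths are nonnegative)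
theorem nonneg_mem_cums (Ls : List Int) (h : ∀ L ∈ Ls, 0 ≤ L) :
    ∀ x ∈ (0 : Int) :: cumsT 0 Ls, 0 ≤ x := by
  intro x hx
  rcases List.mem_cons.mp hx with rfl | hx'
  · exact le_refl _
  · exact le_cumsT Ls 0 0 (le_refl _) h x hx'

theorem str_len_nonneg (ts : List String) : ∀ L ∈ ts.map PySem.Str.len, (0:Int) ≤ L := by
  intro L hL
  obtain ⟨t, _, rfl⟩ := List.mem_map.mp hL
  simp

-- B computes spansOf
theorem B_eq_spans (texts chunk_bodies : List String) :
    map_chunks_to_pages_alt texts chunk_bodies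
      = spansOf ((0 : Int) :: cumsT 0 (texts.map PySem.Str.len)) 0 (chunk_bodies.map PySem.Str.len) := by
  unfold map_chunks_to_pages_alt
  simp only [foldB_ps]
  -- names
  set Ls := texts.map PySem.Str.len with hLs
  set Ks := chunk_bodies.map PySem.Str.len with hKs
  have hLnn : ∀ L ∈ Ls, (0:Int) ≤ L := str_len_nonneg texts
  have hKnn : ∀ L ∈ Ks, (0:Int) ≤ L := str_len_nonneg chunk_bodies
  set ps := (0 : Int) :: cumsT 0 Ls with hps
  have hps_eq : ([0] : List Int) ++ cumsT 0 Ls = ps := by simp [hps]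
  have hoff : ([0] : List Int) ++ cumsT 0 Ks = (0 : Int) :: cumsT 0 Ks := by simp
  rw [hps_eq, hoff]
  have hdrop : PySem.List.slice ((0 : Int) :: cumsT 0 Ks) none (some (-1)) = cumsA 0 Ks := by
    rw [PySem.List.slice_to_neg_one, ← cumsA_append_cend Ks 0, List.dropLast_concat]
  have htail : PySem.List.slice ((0 : Int) :: cumsT 0 Ks) (some 1) none = cumsT 0 Ks := by
    rw [PySem.List.slice_from_one]; rfl
  rw [hdrop, htail]
  -- invariant machinery
  have hppw : List.Pairwise (· ≤ ·) ps := pairwise_cumsT Ls 0 hLnn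
  have hpwK : List.Pairwise (· ≤ ·) ((0 : Int) :: cumsT 0 Ks) := pairwise_cumsT Ks 0 hKnn
  have hpwA : List.Pairwise (· ≤ ·) (cumsA 0 Ks) := by
    have hsub : (cumsA 0 Ks).Sublist ((0 : Int) :: cumsT 0 Ks) := by
      rw [← cumsA_append_cend Ks 0]
      exact List.sublist_append_left _ _
    exact List.Pairwise.sublist hsub hpwK
  have hpwT : List.Pairwise (· ≤ ·) (cumsT 0 Ks) := hpwK.of_cons
  set m := chunk_bodies.length with hm
  have hKlen : Ks.length = m := by simp [hKs, hm]
  have hsL : (cumsA 0 Ks).length = m := by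
    have h1 : (cumsA 0 Ks ++ [cend 0 Ks]).length = (cumsT 0 Ks).length + 1 := by
      rw [cumsA_append_cend]; simp
    have h2 : (cumsT 0 Ks).length = m := by rw [cumsT_length, hKlen]
    simp at h1; omega
  have heL : (cumsT 0 Ks).length = m := by rw [cumsT_length, hKlen]
  have hN : 1 ≤ ps.length := by simp [hps]
  have h0 : ps.getD 0 0 = 0 := by simp [hps]
  have hsm := mono_getD_of_pairwise (cumsA 0 Ks) hpwA
  have hem := mono_getD_of_pairwise (cumsT 0 Ks) hpwT
  have hsnn : ∀ t, t < m → (0:Int) ≤ (cumsA 0 Ks).getD t 0 := by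
    intro t ht
    rw [List.getD_eq_getElem _ 0 (by omega)]
    refine nonneg_mem_cums Ks hKnn _ ?_
    have : (cumsA 0 Ks)[t]'(by omega) ∈ cumsA 0 Ks := List.getElem_mem _
    rw [← cumsA_append_cend Ks 0]
    exact List.mem_append_left _ this
  have hloop := pages_loop ps (cumsA 0 Ks) (cumsT 0 Ks) m
    hppw h0 hN
    (fun t u htu hu => hsm t u htu (by omega))
    (fun t u htu hu => hem t u htu (by omega))
    (ps.length - 1) 0 (by omega)
    (List.replicate m 1) (List.replicate m 1) 0 0
    (by omega) (by simp)
    (fun t ht => by omega)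
    (fun t ht1 ht2 => ⟨by rw [List.getD_eq_getElem _ 0 (by simp; omega)]; simp, by
      rw [h0]; exact hsnn t ht2⟩)
    (by omega) (by simp)
    (fun t ht => by omega)
    (fun t ht1 ht2 => ⟨by rw [List.getD_eq_getElem _ 0 (by simp; omega)]; simp, Or.inl rfl⟩)
  obtain ⟨hl1, hl2, hv1, hv2⟩ := hloop
  -- align casts: the loop runs over pyRange ((0:Nat):Int) (len-1)
  rw [Nat.cast_zero] at hl1 hl2 hv1 hv2
  refine List.ext_getElem ?_ ?_
  · rw [List.length_zipWith, hl1, hl2, spansOf_length]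
    simp [hKlen]
  · intro t ht1 ht2
    rw [List.length_zipWith, hl1, hl2] at ht1
    simp only [Nat.min_self] at ht1
    rw [List.getElem_zipWith]
    have hsp := hv1 t ht1
    have hep := hv2 t ht1
    rw [List.getD_eq_getElem _ 0 (by rw [hl1]; omega)] at hsp
    rw [List.getD_eq_getElem _ 0 (by rw [hl2]; omega)] at hep
    rw [hsp, hep]
    have := spansOf_getD ps Ks 0 t (by omega)
    rw [List.getD_eq_getElem _ [] (by rw [spansOf_length]; omega)] at this
    rw [this]

-- A computes spansOf
theorem A_eq_spans (texts chunk_bodies : List String) :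
    map_chunks_to_pages texts chunk_bodies
      = spansOf ((0 : Int) :: cumsT 0 (texts.map PySem.Str.len)) 0 (chunk_bodies.map PySem.Str.len) := by
  unfold map_chunks_to_pages
  simp only [foldA_ps, List.nil_append]
  rw [cumsA_append_cend]
  have hLnn := str_len_nonneg texts
  have hppw : List.Pairwise (· ≤ ·) ((0:Int) :: cumsT 0 (texts.map PySem.Str.len)) :=
    pairwise_cumsT _ 0 hLnn
  rw [A_chunks_eq ((0:Int) :: cumsT 0 (texts.map PySem.Str.len)) (by simp) (by simp) hppw
    chunk_bodies [] 0 (le_refl 0)]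
  simp

-- ===== VERDICT (by name: the statement is the Claim_ definition above) =====
theorem map_chunks_to_pages_spec : Claim_equal_map_chunks_to_pages := by
  intro texts chunk_bodies _
  unfold Spec_map_chunks_to_pages
  rw [A_eq_spans, B_eq_spans]
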